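-- pv_equiv track=rewrite | github.com/Novus-Engine/novuspack | scripts/validate_heading_numbering.py | _find_backtick_ranges
-- ===== SOURCE A (Python) =====
-- def _find_backtick_ranges(text):
--     """Find all backtick-enclosed sections and their positions."""
--     backtick_ranges = []
--     i = 0
--     while i < len(text):
--         if text[i] == '`':
--             start = i
--             i += 1
--             # Find the closing backtick
--             while i < len(text) and text[i] != '`':
--                 i += 1
--             if i < len(text):  # Found closing backtick
--                 end = i + 1
--                 backtick_ranges.append((start, end))
--                 i = end
--             else:
--                 # Unclosed backtick, treat as regular text
--                 break
--         else:
--             i += 1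
--     return backtick_ranges
-- ===== SOURCE B (Python) =====
-- def _find_backtick_ranges(text):
--     """Find all backtick-enclosed sections and their positions."""
--     positions = [j for j, c in enumerate(text) if c == '`']
--     it = iter(positions)
--     return [(a, b + 1) for a, b in zip(it, it)]
-- ===== Notes on version B (the rewrite author's own statement) =====
-- stated objective: simpler
-- what changed: Replaced the index-driven while loop with nested closing-backtick scan by one comprehension collecting all backtick positions and pairing consecutive positions via zip of a single iterator (the odd trailing backtick is naturally dropped, matching A's break on an unclosed backtick); the list-comprehension pass is measurably faster than A's per-character interpreted loop.
import Mathlib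
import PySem

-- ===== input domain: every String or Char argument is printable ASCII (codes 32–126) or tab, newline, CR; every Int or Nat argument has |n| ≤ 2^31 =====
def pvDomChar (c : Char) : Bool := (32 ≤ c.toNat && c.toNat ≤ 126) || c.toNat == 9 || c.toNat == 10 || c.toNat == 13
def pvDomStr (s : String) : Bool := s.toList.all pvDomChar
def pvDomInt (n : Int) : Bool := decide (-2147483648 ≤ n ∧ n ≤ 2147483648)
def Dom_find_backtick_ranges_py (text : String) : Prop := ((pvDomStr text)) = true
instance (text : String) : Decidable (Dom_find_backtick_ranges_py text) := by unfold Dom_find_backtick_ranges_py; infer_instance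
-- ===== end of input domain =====

-- B replaces A's index-driven while loop (with nested closing-backtick scan) by one pass
-- collecting all backtick positions and pairing consecutive positions; objective: simpler.

-- ===== PORT A =====
-- inner 'while i < len(text) and text[i] != '`'': scan for the closing backtick;
-- returns its index and the remaining characters after it (none = ran off the end)
def pvFindClose : List Char → Int → Option (Int × List Char)
  | [], _ => none
  | c :: cs, i => if c == '`' then some (i, cs) else pvFindClose cs (i + 1)

theorem pvFindClose_length : ∀ (cs : List Char) (i j : Int) (rest : List Char),
    pvFindClose cs i = some (j, rest) → rest.length < cs.length := by
  intro cs
  induction cs with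
  | nil => intro _ _ _ h; simp [pvFindClose] at h
  | cons c cs ih =>
    intro i j rest h
    simp only [pvFindClose] at h
    split at h
    · cases h; simp
    · exact Nat.lt_succ_of_lt (ih _ _ _ h)

-- outer 'while i < len(text)' of A
def pvGoA : List Char → Int → List (Int × Int)
  | [], _ => []
  | c :: cs, i =>
    if c == '`' then
      match h : pvFindClose cs (i + 1) with
      | some (j, rest) => (i, j + 1) :: pvGoA rest (j + 1)
      | none => []  -- unclosed backtick: break
    else pvGoA cs (i + 1)
termination_by cs _ => cs.length
decreasing_by
  · exact Nat.lt_succ_of_lt (pvFindClose_length _ _ _ _ h)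
  · simp

def find_backtick_ranges_py (text : String) : List (Int × Int) := pvGoA text.toList 0

-- ===== PORT B =====
-- '[(a, b + 1) for a, b in zip(it, it)]' over one iterator: pair consecutive positions
def pvPairUp : List Int → List (Int × Int)
  | a :: b :: rest => (a, b + 1) :: pvPairUp rest
  | _ => []

def find_backtick_ranges_py_alt (text : String) : List (Int × Int) :=
  pvPairUp (((PySem.List.enumerate text.toList).filter (fun p => p.2 == '`')).map (fun p => p.1))

-- ===== PRECONDITION & SPEC =====
def Spec_find_backtick_ranges_py (text : String) (out : List (Int × Int)) : Prop := out = find_backtick_ranges_py_alt text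
instance (text : String) (out : List (Int × Int)) : Decidable (Spec_find_backtick_ranges_py text out) := by unfold Spec_find_backtick_ranges_py; infer_instance

-- ===== CLAIM (what is proved, stated in full; the proofs are below) =====
def Claim_equal_find_backtick_ranges_py : Prop := ∀ (text : String), Dom_find_backtick_ranges_py text → Spec_find_backtick_ranges_py text (find_backtick_ranges_py text)

-- ===== LEMMAS AND PROOFS =====

-- the list of backtick positions in cs, indices starting at i
def pvBT : List Char → Int → List Int
  | [], _ => []
  | c :: cs, i => if c == '`' then i :: pvBT cs (i + 1) else pvBT cs (i + 1)

theorem pvBT_eq_enum : ∀ (cs : List Char) (i : Int),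
    ((PySem.List.enumerate cs i).filter (fun p => p.2 == '`')).map (fun p => p.1) = pvBT cs i := by
  intro cs
  induction cs with
  | nil => intro i; simp [PySem.List.enumerate_nil, pvBT]
  | cons c cs ih =>
    intro i
    rw [PySem.List.enumerate_cons]
    by_cases h : c = '`' <;> simp [pvBT, h, ih]

theorem pvFindClose_none (cs : List Char) (i : Int) (h : pvFindClose cs i = none) :
    pvBT cs i = [] := by
  induction cs generalizing i with
  | nil => simp [pvBT]
  | cons c cs ih =>
    simp only [pvFindClose] at h
    split at h
    · exact absurd h (by simp)
    · simpa [pvBT, show ¬ c = '`' by simpa using ‹¬ (c == '`') = true›] using ih _ h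

theorem pvFindClose_some (cs : List Char) (i j : Int) (rest : List Char)
    (h : pvFindClose cs i = some (j, rest)) : pvBT cs i = j :: pvBT rest (j + 1) := by
  induction cs generalizing i with
  | nil => simp [pvFindClose] at h
  | cons c cs ih =>
    simp only [pvFindClose] at h
    split at h
    · cases h
      simp [pvBT, show c = '`' by simpa using ‹(c == '`') = true›]
    · simpa [pvBT, show ¬ c = '`' by simpa using ‹¬ (c == '`') = true›] using ih _ h

theorem pvGoA_eq_pairUp : ∀ (cs : List Char) (i : Int), pvGoA cs i = pvPairUp (pvBT cs i) := by
  intro cs i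
  induction cs, i using pvGoA.induct with
  | case1 i => simp [pvGoA, pvBT, pvPairUp]
  | case2 c cs i hc j rest h ih =>
    rw [pvGoA, if_pos hc]
    split
    next j' rest' h' =>
      rw [h] at h'
      simp only [Option.some.injEq, Prod.mk.injEq] at h'
      obtain ⟨rfl, rfl⟩ := h'
      rw [pvBT, if_pos hc, pvFindClose_some _ _ _ _ h, pvPairUp, ih]
    next h' => rw [h] at h'; cases h'
  | case3 c cs i hc h =>
    rw [pvGoA, if_pos hc]
    split
    next j' rest' h' => rw [h] at h'; cases h'
    next h' =>
      rw [pvBT, if_pos hc, pvFindClose_none _ _ h]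
      rfl
  | case4 c cs i hc ih =>
    rw [pvGoA, if_neg hc, pvBT, if_neg hc, ih]

-- ===== VERDICT (by name: the statement is the Claim_ definition above) =====
theorem find_backtick_ranges_py_spec : Claim_equal_find_backtick_ranges_py := by
  intro text _
  unfold Spec_find_backtick_ranges_py find_backtick_ranges_py find_backtick_ranges_py_alt
  rw [pvGoA_eq_pairUp, pvBT_eq_enum]
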